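-- pv_equiv track=rewrite | github.com/R3V1S3/Performance-Lab | task1/task1.py | circular_path
-- ===== SOURCE A (Python) =====
-- def circular_path(n, m):
--     # Создаем круговой массив от 1 до n
--     arr = list(range(1, n + 1))
--     path = []
--
--     current_position = 0
--
--     while True:
--         # Добавляем начальный элемент интервала в путь
--         path.append(arr[current_position])
--
--         # Рассчитываем новую позицию
--         current_position = (current_position + m - 1) % n # Рассчет остатка от деления на n для исключения выхода за пределы массива
--
--         if current_position == 0:
--             break
--
--     return path
-- ===== SOURCE B (Python) =====
-- def _gcd(a, b):
--     while b:
--         a, b = b, a % b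
--     return a
--
--
-- def circular_path(n, m):
--     # closed form: the walk steps by s = (m-1) % n from position 0, so it visits
--     # exactly the multiples of s modulo n; the orbit length is n // gcd(n, s).
--     s = (m - 1) % n
--     count = n // _gcd(n, s)
--     return [(k * s) % n + 1 for k in range(count)]
-- ===== Notes on version B (the rewrite author's own statement) =====
-- stated objective: alternative
-- what changed: Replaces A's step-by-step walk around the circular array (append arr[pos], pos = (pos+m-1) % n until pos returns to 0) with a closed form: the walk visits exactly the multiples of s = (m-1) % n modulo n, the orbit length is n // gcd(n, s), and B generates the path directly by a comprehension (k*s) % n + 1 for k in range(n // gcd(n, s)).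
import Mathlib
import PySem

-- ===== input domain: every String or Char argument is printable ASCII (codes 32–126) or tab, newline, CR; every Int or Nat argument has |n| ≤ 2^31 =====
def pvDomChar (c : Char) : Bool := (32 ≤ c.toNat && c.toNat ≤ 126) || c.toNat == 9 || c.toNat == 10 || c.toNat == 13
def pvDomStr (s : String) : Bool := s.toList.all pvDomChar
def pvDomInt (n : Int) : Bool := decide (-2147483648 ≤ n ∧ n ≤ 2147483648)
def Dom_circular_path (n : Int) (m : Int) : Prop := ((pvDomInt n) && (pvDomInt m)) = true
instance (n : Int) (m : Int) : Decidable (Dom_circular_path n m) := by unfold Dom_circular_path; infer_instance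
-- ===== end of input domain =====

-- B replaces A's step-by-step walk with a closed form: the walk visits the multiples of
-- s = (m-1) % n modulo n, orbit length n // gcd(n, s), generated directly (objective: alternative).


-- ===== PORT A =====
-- A's while-loop: append arr[pos], step pos := (pos + m - 1) % n, stop when the new pos is 0.
-- fuel bounds the iterations (inside Pre_ the loop runs at most n times, so fuel n.toNat never
-- runs out there); a failing arr[pos] (Python's IndexError, reached when n ≤ 0) is excluded by Pre_.
def circular_path_loop (n : Int) (m : Int) : Nat → Int → List Int
  | 0, _ => []
  | fuel + 1, pos =>
    match PySem.List.pyGet? (PySem.List.pyRange 1 (n + 1) 1) pos with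
    | none => []
    | some v =>
      let pos' := PySem.Int.mod (pos + m - 1) n
      if pos' = 0 then [v] else v :: circular_path_loop n m fuel pos'

def circular_path (n : Int) (m : Int) : List Int :=
  circular_path_loop n m n.toNat 0

-- ===== PORT B =====
-- Source B's hand-written Euclid (while b: a, b = b, a % b)
def pyGcd (a : Int) (b : Int) : Int :=
  if _h : b = 0 then a
  else pyGcd b (PySem.Int.mod a b)
termination_by b.natAbs
decreasing_by
  rcases lt_trichotomy b 0 with hb | hb | hb
  · have h1 := PySem.Int.mod_neg_bounds a hb
    omega
  · exact absurd hb _h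
  · have h1 := PySem.Int.mod_nonneg a hb
    have h2 := PySem.Int.mod_lt a hb
    omega

def circular_path_alt (n : Int) (m : Int) : List Int :=
  let s := PySem.Int.mod (m - 1) n
  let count := PySem.Int.floordiv n (pyGcd n s)
  (PySem.List.pyRange 0 count 1).map (fun k => PySem.Int.mod (k * s) n + 1)

-- ===== PRECONDITION & SPEC =====
-- Pre_ excludes exactly n ≤ 0, on which A raises IndexError (arr is empty, so arr[0] fails).
def Pre_circular_path (n : Int) (m : Int) : Prop := 1 ≤ n
instance (n : Int) (m : Int) : Decidable (Pre_circular_path n m) := by unfold Pre_circular_path; infer_instance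
def pvWitness_circular_path : Int × Int := (6, 3)

def Spec_circular_path (n : Int) (m : Int) (out : List Int) : Prop := out = circular_path_alt n m
instance (n : Int) (m : Int) (out : List Int) : Decidable (Spec_circular_path n m out) := by unfold Spec_circular_path; infer_instance

-- ===== CLAIM (what is proved, stated in full; the proofs are below) =====
def Claim_equal_circular_path : Prop := ∀ (n : Int) (m : Int), Dom_circular_path n m → Pre_circular_path n m → Spec_circular_path n m (circular_path n m)

-- ===== LEMMAS AND PROOFS =====

-- Source B's Euclid computes the gcd on the nonnegative inputs it is used with (fuel-indexed induction)
theorem pyGcd_eq_gcd_aux : ∀ (bn : Nat) (a b : Int), 0 ≤ a → 0 ≤ b → b.natAbs ≤ bn →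
    pyGcd a b = ((Int.gcd a b : Nat) : Int) := by
  intro bn
  induction bn with
  | zero =>
    intro a b ha hb hle
    have hb0 : b = 0 := by omega
    subst hb0
    rw [pyGcd]
    simp [Int.gcd_def, Int.natAbs_of_nonneg ha]
  | succ k ih =>
    intro a b ha hb hle
    by_cases h0 : b = 0
    · subst h0
      rw [pyGcd]
      simp [Int.gcd_def, Int.natAbs_of_nonneg ha]
    · have hbpos : 0 < b := by omega
      rw [pyGcd, dif_neg h0, PySem.Int.mod_eq_emod_of_pos hbpos]
      have hm0 : 0 ≤ a % b := Int.emod_nonneg a h0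
      have hmlt : a % b < b := Int.emod_lt_of_pos a hbpos
      rw [ih b (a % b) hb hm0 (by omega)]
      congr 1
      rw [Int.gcd_def, Int.gcd_def]
      have hab : (a % b).natAbs = a.natAbs % b.natAbs := by
        obtain ⟨A, rfl⟩ : ∃ A : Nat, a = (A : Int) := ⟨a.toNat, by omega⟩
        obtain ⟨B, rfl⟩ : ∃ B : Nat, b = (B : Int) := ⟨b.toNat, by omega⟩
        simp only [← Int.natCast_mod, Int.natAbs_natCast]
      rw [hab, Nat.gcd_comm, ← Nat.gcd_rec, Nat.gcd_comm]

theorem pyGcd_eq_gcd (a b : Int) (ha : 0 ≤ a) (hb : 0 ≤ b) :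
    pyGcd a b = ((Int.gcd a b : Nat) : Int) :=
  pyGcd_eq_gcd_aux b.natAbs a b ha hb le_rfl

-- N divides (N / gcd N S) * S
theorem orbit_dvd (N S : Nat) : N ∣ (N / Nat.gcd N S) * S := by
  refine ⟨S / Nat.gcd N S, ?_⟩
  calc (N / Nat.gcd N S) * S
      = (N / Nat.gcd N S) * (Nat.gcd N S * (S / Nat.gcd N S)) := by
        rw [Nat.mul_div_cancel' (Nat.gcd_dvd_right N S)]
    _ = ((N / Nat.gcd N S) * Nat.gcd N S) * (S / Nat.gcd N S) := by ring
    _ = N * (S / Nat.gcd N S) := by rw [Nat.div_mul_cancel (Nat.gcd_dvd_left N S)]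

-- minimality: N ∣ J*S forces (N / gcd N S) ∣ J
theorem orbit_min (N S J : Nat) (hN : 0 < N) (h : N ∣ J * S) : (N / Nat.gcd N S) ∣ J := by
  have hG0 : 0 < Nat.gcd N S := Nat.gcd_pos_of_pos_left _ hN
  have h1 : (N / Nat.gcd N S) * Nat.gcd N S ∣ (J * (S / Nat.gcd N S)) * Nat.gcd N S := by
    rwa [Nat.div_mul_cancel (Nat.gcd_dvd_left N S), mul_assoc,
      Nat.div_mul_cancel (Nat.gcd_dvd_right N S)]
  have h2 : (N / Nat.gcd N S) ∣ J * (S / Nat.gcd N S) :=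
    (Nat.mul_dvd_mul_iff_right hG0).mp h1
  exact (Nat.coprime_div_gcd_div_gcd hG0).dvd_of_dvd_mul_right h2

-- the walk from position (k*S) % N yields exactly the closed-form tail of B's list
theorem loop_eq (n m : Int) (N S C : Nat) (hNn : n = (N : Int)) (hN0 : 0 < N)
    (hS : PySem.Int.mod (m - 1) n = (S : Int))
    (hC : C = N / Nat.gcd N S) :
    ∀ (fuel k : Nat), k < C → C - k ≤ fuel →
    circular_path_loop n m fuel (((k * S % N : Nat)) : Int)
      = (PySem.List.pyRange (k : Int) (C : Int) 1).map
          (fun j => PySem.Int.mod (j * PySem.Int.mod (m - 1) n) n + 1) := by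
  subst hNn
  have hG0 : 0 < Nat.gcd N S := Nat.gcd_pos_of_pos_left _ hN0
  have hC0 : 0 < C := hC ▸ Nat.div_pos (Nat.le_of_dvd hN0 (Nat.gcd_dvd_left N S)) hG0
  intro fuel
  induction fuel with
  | zero => intro k hk hf; omega
  | succ f ih =>
    intro k hk hf
    have hp : k * S % N < N := Nat.mod_lt _ hN0
    rw [circular_path_loop]
    have harr : PySem.List.pyGet? (PySem.List.pyRange 1 ((N : Int) + 1) 1)
        (((k * S % N : Nat)) : Int) = some (1 + ((k * S % N : Nat) : Int)) := by
      rw [PySem.List.pyGet?_natCast, PySem.List.pyRange_one]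
      have hlen : ((N : Int) + 1 - 1).toNat = N := by omega
      rw [hlen]
      simp [hp]
    rw [harr]
    have hval : (1 : Int) + ((k * S % N : Nat) : Int)
        = PySem.Int.mod ((k : Int) * PySem.Int.mod (m - 1) (N : Int)) (N : Int) + 1 := by
      rw [hS, show (k : Int) * (S : Int) = ((k * S : Nat) : Int) by push_cast; ring,
        PySem.Int.mod_natCast]
      ring
    have hstep : PySem.Int.mod (((k * S % N : Nat) : Int) + m - 1) (N : Int)
        = (((k + 1) * S % N : Nat) : Int) := by
      have hNpos : (0 : Int) < (N : Int) := by exact_mod_cast hN0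
      rw [PySem.Int.mod_eq_emod_of_pos hNpos]
      have hm1 : (m - 1) % (N : Int) = (S : Int) := by
        rw [← PySem.Int.mod_eq_emod_of_pos hNpos]; exact hS
      have h1 : ((k * S % N : Nat) : Int) + m - 1 = ((k * S % N : Nat) : Int) + (m - 1) := by ring
      rw [h1, Int.add_emod]
      rw [hm1]
      have h2 : ((k * S % N : Nat) : Int) % (N : Int) = ((k * S % N : Nat) : Int) :=
        Int.emod_eq_of_lt (Int.natCast_nonneg _) (by exact_mod_cast hp)
      rw [h2]
      rw [show ((k * S % N : Nat) : Int) + (S : Int) = ((k * S % N + S : Nat) : Int) by push_cast; ring,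
        ← Int.natCast_mod]
      congr 1
      rw [Nat.mod_add_mod]
      ring_nf
    dsimp only
    rw [hstep]
    by_cases hend : ((k + 1) * S % N : Nat) = 0
    · have hdvd : N ∣ (k + 1) * S := Nat.dvd_of_mod_eq_zero hend
      have hcd : C ∣ (k + 1) := hC ▸ orbit_min N S (k + 1) hN0 hdvd
      have hkC : k + 1 = C := Nat.le_antisymm (by omega) (Nat.le_of_dvd (by omega) hcd)
      rw [if_pos (by exact_mod_cast hend)]
      rw [← hkC, show ((k + 1 : Nat) : Int) = (k : Int) + 1 by push_cast; ring,
        PySem.List.pyRange_one_singleton, List.map_singleton, hval]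
    · have hk1 : k + 1 < C := by
        rcases Nat.lt_or_ge (k + 1) C with h | h
        · exact h
        · exfalso
          apply hend
          have hkc : k + 1 = C := by omega
          rw [hkc, hC]
          exact Nat.mod_eq_zero_of_dvd (orbit_dvd N S)
      rw [if_neg (by exact_mod_cast hend)]
      rw [PySem.List.pyRange_one_cons (by exact_mod_cast hk), List.map_cons]
      rw [show ((k : Int) + 1) = ((k + 1 : Nat) : Int) by push_cast; ring]
      rw [ih (k + 1) hk1 (by omega), hval]

-- ===== VERDICT (by name: the statement is the Claim_ definition above) =====
theorem circular_path_spec : Claim_equal_circular_path := by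
  intro n m _ hpre
  have hn : 1 ≤ n := hpre
  obtain ⟨N, rfl⟩ : ∃ N : Nat, n = (N : Int) := ⟨n.toNat, by omega⟩
  have hN0 : 0 < N := by omega
  have hNpos : (0 : Int) < (N : Int) := by exact_mod_cast hN0
  have hs0 : 0 ≤ PySem.Int.mod (m - 1) (N : Int) := PySem.Int.mod_nonneg _ hNpos
  have hslt : PySem.Int.mod (m - 1) (N : Int) < (N : Int) := PySem.Int.mod_lt _ hNpos
  obtain ⟨S, hS⟩ : ∃ S : Nat, PySem.Int.mod (m - 1) (N : Int) = (S : Int) :=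
    ⟨(PySem.Int.mod (m - 1) (N : Int)).toNat, by omega⟩
  have hG0 : 0 < Nat.gcd N S := Nat.gcd_pos_of_pos_left _ hN0
  have hg : pyGcd (N : Int) (PySem.Int.mod (m - 1) (N : Int)) = ((Nat.gcd N S : Nat) : Int) := by
    rw [pyGcd_eq_gcd _ _ (by positivity) hs0, Int.gcd_def, hS]
    simp
  have hcount : PySem.Int.floordiv (N : Int) (pyGcd (N : Int) (PySem.Int.mod (m - 1) (N : Int)))
      = ((N / Nat.gcd N S : Nat) : Int) := by
    rw [hg, PySem.Int.floordiv_eq_ediv_of_pos (by exact_mod_cast hG0), Int.natCast_div]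
  have hC0 : 0 < N / Nat.gcd N S :=
    Nat.div_pos (Nat.le_of_dvd hN0 (Nat.gcd_dvd_left N S)) hG0
  have hCle : N / Nat.gcd N S ≤ N := Nat.div_le_self _ _
  show circular_path (N : Int) m = circular_path_alt (N : Int) m
  unfold circular_path circular_path_alt
  dsimp only
  rw [hcount]
  have hfuel : ((N : Int)).toNat = N := by omega
  rw [hfuel]
  have h0 : (0 : Int) = ((0 * S % N : Nat) : Int) := by simp [Nat.mod_eq_of_lt hN0]
  rw [h0, loop_eq (N : Int) m N S (N / Nat.gcd N S) rfl hN0 hS rfl N 0 hC0 (by omega)]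
  norm_num
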